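-- pv_equiv track=rewrite | github.com/ndeso17/SPARX | scripts/deteksitnkb.py | correct_with_context
-- ===== SOURCE A (Python) =====
-- def correct_with_context(text: str) -> str:
--     """Apply context-aware corrections for Indonesian plates."""
--     if not text or len(text) < 6:
--         return text
--
--     chars = list(text)
--
--     # Corrections based on position
--     for i in range(len(chars)):
--         # Prefix (first 1-2 chars): should be letters
--         if i <= 1:
--             if chars[i] == '0':
--                 chars[i] = 'O'
--             elif chars[i] == '1':
--                 chars[i] = 'I'
--             elif chars[i] == '5':
--                 chars[i] = 'S'
--             elif chars[i] == '8':
--                 chars[i] = 'B'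
--
--         # Number section (chars 2-5): should be digits
--         elif i >= 2 and i <= 5:
--             if chars[i] == 'O':
--                 chars[i] = '0'
--             elif chars[i] == 'I' or chars[i] == 'L':
--                 chars[i] = '1'
--             elif chars[i] == 'S':
--                 chars[i] = '5'
--             elif chars[i] == 'B':
--                 chars[i] = '8'
--             elif chars[i] == 'Z':
--                 chars[i] = '2'
--             elif chars[i] == 'G':
--                 chars[i] = '6'
--
--         # Suffix (chars 6+): should be letters
--         elif i >= 6:
--             if chars[i] == '0':
--                 chars[i] = 'O'
--             elif chars[i] == '1':
--                 chars[i] = 'I'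
--             elif chars[i] == '5':
--                 chars[i] = 'S'
--
--     corrected = ''.join(chars)
--
--     return corrected
-- ===== SOURCE B (Python) =====
-- # Staged bulk passes: iterate over a rule table, applying str.replace to each
-- # region slice, instead of a per-character positional loop.  Correct because no
-- # rule's output character is another rule's input character within the same
-- # region, so sequential whole-region replaces cannot chain.
-- _RULES = (
--     ((0, 2), (('0', 'O'), ('1', 'I'), ('5', 'S'), ('8', 'B'))),
--     ((2, 6), (('O', '0'), ('I', '1'), ('L', '1'), ('S', '5'),
--               ('B', '8'), ('Z', '2'), ('G', '6'))),
--     ((6, None), (('0', 'O'), ('1', 'I'), ('5', 'S'))),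
-- )
--
--
-- def correct_with_context(text: str) -> str:
--     """Apply context-aware corrections for Indonesian plates."""
--     if not text or len(text) < 6:
--         return text
--     out = []
--     for (start, stop), rules in _RULES:
--         seg = text[start:stop]
--         for wrong, right in rules:
--             seg = seg.replace(wrong, right)
--         out.append(seg)
--     return ''.join(out)
-- ===== Notes on version B (the rewrite author's own statement) =====
-- stated objective: alternative
-- what changed: Replaces A's single per-character loop with positional branching by a data-driven rule table: the string is cut into three region slices and, for each (wrong,right) rule, a whole-region str.replace pass is applied (iteration is over rules, not characters); correct because no rule's output is another rule's input in the same region, so passes cannot chain.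
import Mathlib
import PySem

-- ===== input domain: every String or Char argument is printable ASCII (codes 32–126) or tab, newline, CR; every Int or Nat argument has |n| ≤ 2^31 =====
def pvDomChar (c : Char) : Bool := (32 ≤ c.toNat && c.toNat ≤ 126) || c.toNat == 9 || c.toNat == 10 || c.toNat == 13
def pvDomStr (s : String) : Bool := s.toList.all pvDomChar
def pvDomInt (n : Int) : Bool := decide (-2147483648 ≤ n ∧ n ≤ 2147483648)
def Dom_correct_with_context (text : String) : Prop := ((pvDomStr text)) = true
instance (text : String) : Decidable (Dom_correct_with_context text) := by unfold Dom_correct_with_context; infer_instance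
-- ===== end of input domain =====

-- B replaces A's per-character positional loop by a data-driven rule table: three region
-- slices, each corrected by whole-region replace passes, one per rule (alternative decomposition).

-- ===== PORT A =====
-- The loop body reads chars[i] for i in range(len(chars)), always in range, so List.getD is exact here.
def correct_with_context (text : String) : String :=
  if text = "" ∨ PySem.Str.len text < 6 then text
  else
    let chars := text.toList
    let chars := (List.range chars.length).foldl (fun cs i =>
      if i ≤ 1 then
        if cs.getD i ' ' = '0' then cs.set i 'O'
        else if cs.getD i ' ' = '1' then cs.set i 'I'
        else if cs.getD i ' ' = '5' then cs.set i 'S'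
        else if cs.getD i ' ' = '8' then cs.set i 'B'
        else cs
      else if 2 ≤ i ∧ i ≤ 5 then
        if cs.getD i ' ' = 'O' then cs.set i '0'
        else if cs.getD i ' ' = 'I' ∨ cs.getD i ' ' = 'L' then cs.set i '1'
        else if cs.getD i ' ' = 'S' then cs.set i '5'
        else if cs.getD i ' ' = 'B' then cs.set i '8'
        else if cs.getD i ' ' = 'Z' then cs.set i '2'
        else if cs.getD i ' ' = 'G' then cs.set i '6'
        else cs
      else if 6 ≤ i then
        if cs.getD i ' ' = '0' then cs.set i 'O'
        else if cs.getD i ' ' = '1' then cs.set i 'I'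
        else if cs.getD i ' ' = '5' then cs.set i 'S'
        else cs
      else cs) chars
    String.ofList chars

-- ===== PORT B =====
-- Source B's module-level _RULES table: ((start, stop), list of (wrong, right) pairs)
def pvRules : List ((Option Int × Option Int) × List (Char × Char)) :=
  [((some 0, some 2), [('0', 'O'), ('1', 'I'), ('5', 'S'), ('8', 'B')]),
   ((some 2, some 6), [('O', '0'), ('I', '1'), ('L', '1'), ('S', '5'),
                       ('B', '8'), ('Z', '2'), ('G', '6')]),
   ((some 6, none),   [('0', 'O'), ('1', 'I'), ('5', 'S')])]

-- Source B's str.replace on single-character strings, via PySem.Chars.replace on the char list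
def correct_with_context_alt (text : String) : String :=
  if text = "" ∨ PySem.Str.len text < 6 then text
  else
    let l := text.toList
    String.ofList (pvRules.foldl (fun out r =>
      out ++ r.2.foldl (fun seg p => PySem.Chars.replace seg [p.1] [p.2])
               (PySem.List.slice l r.1.1 r.1.2)) [])

-- ===== PRECONDITION & SPEC =====
def Spec_correct_with_context (text : String) (out : String) : Prop := out = correct_with_context_alt text
instance (text : String) (out : String) : Decidable (Spec_correct_with_context text out) := by unfold Spec_correct_with_context; infer_instance

-- ===== CLAIM (what is proved, stated in full; the proofs are below) =====
def Claim_equal_correct_with_context : Prop := ∀ (text : String), Dom_correct_with_context text → Spec_correct_with_context text (correct_with_context text)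

-- ===== LEMMAS AND PROOFS =====

-- the three region translations, as character functions (proof-side names)
def pvTransPrefix (c : Char) : Char :=
  if c = '0' then 'O' else if c = '1' then 'I' else if c = '5' then 'S' else if c = '8' then 'B' else c

def pvTransMiddle (c : Char) : Char :=
  if c = 'O' then '0' else if c = 'I' then '1' else if c = 'L' then '1' else if c = 'S' then '5'
  else if c = 'B' then '8' else if c = 'Z' then '2' else if c = 'G' then '6' else c

def pvTransSuffix (c : Char) : Char :=
  if c = '0' then 'O' else if c = '1' then 'I' else if c = '5' then 'S' else c

-- the per-position correction A's loop applies, as a function of index and character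
def pvFix (i : Nat) (c : Char) : Char :=
  if i ≤ 1 then pvTransPrefix c else if i ≤ 5 then pvTransMiddle c else pvTransSuffix c

-- A's loop body, named for the lemmas
def pvBody (cs : List Char) (i : Nat) : List Char :=
  if i ≤ 1 then
    if cs.getD i ' ' = '0' then cs.set i 'O'
    else if cs.getD i ' ' = '1' then cs.set i 'I'
    else if cs.getD i ' ' = '5' then cs.set i 'S'
    else if cs.getD i ' ' = '8' then cs.set i 'B'
    else cs
  else if 2 ≤ i ∧ i ≤ 5 then
    if cs.getD i ' ' = 'O' then cs.set i '0'
    else if cs.getD i ' ' = 'I' ∨ cs.getD i ' ' = 'L' then cs.set i '1'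
    else if cs.getD i ' ' = 'S' then cs.set i '5'
    else if cs.getD i ' ' = 'B' then cs.set i '8'
    else if cs.getD i ' ' = 'Z' then cs.set i '2'
    else if cs.getD i ' ' = 'G' then cs.set i '6'
    else cs
  else if 6 ≤ i then
    if cs.getD i ' ' = '0' then cs.set i 'O'
    else if cs.getD i ' ' = '1' then cs.set i 'I'
    else if cs.getD i ' ' = '5' then cs.set i 'S'
    else cs
  else cs

set_option maxHeartbeats 1000000 in
theorem pvBody_eq_set (cs : List Char) (i : Nat) (h : i < cs.length) :
    pvBody cs i = cs.set i (pvFix i (cs.getD i ' ')) := by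
  have hself : cs.set i (cs.getD i ' ') = cs := by
    rw [List.getD_eq_getElem cs ' ' h]; exact List.set_getElem_self h
  unfold pvBody pvFix pvTransPrefix pvTransMiddle pvTransSuffix
  split_ifs <;> first
    | rfl
    | (exact hself.symm)
    | omega
    | tauto

theorem pvBody_length (cs : List Char) (i : Nat) : (pvBody cs i).length = cs.length := by
  unfold pvBody; split_ifs <;> simp

theorem pvFoldl_length (idxs : List Nat) (l : List Char) :
    (idxs.foldl pvBody l).length = l.length := by
  induction idxs generalizing l with
  | nil => rfl
  | cons i idxs ih => simp [List.foldl_cons, ih, pvBody_length]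

theorem pvFoldl_append (n : Nat) (l : List Char) (x : Char) (h : n ≤ l.length) :
    (List.range n).foldl pvBody (l ++ [x]) = ((List.range n).foldl pvBody l) ++ [x] := by
  induction n with
  | zero => simp
  | succ k ih =>
    have hk : k < l.length := h
    have hlen : ((List.range k).foldl pvBody l).length = l.length := pvFoldl_length _ _
    rw [List.range_succ, List.foldl_append, List.foldl_append, ih (le_of_lt hk)]
    simp only [List.foldl_cons, List.foldl_nil]
    rw [pvBody_eq_set _ _ (by simp [hlen]; omega), pvBody_eq_set _ _ (by omega)]
    rw [List.getD_append _ _ _ _ (by omega), List.set_append_left _ _ (by omega)]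

theorem pvFoldl_eq_mapIdx (l : List Char) :
    (List.range l.length).foldl pvBody l = l.mapIdx pvFix := by
  induction l using List.reverseRecOn with
  | nil => rfl
  | append_singleton l x ih =>
    have hlen : (l ++ [x]).length = l.length + 1 := by simp
    rw [hlen, List.range_succ, List.foldl_append]
    simp only [List.foldl_cons, List.foldl_nil]
    rw [pvFoldl_append l.length l x le_rfl, ih]
    have hm : (l.mapIdx pvFix).length = l.length := by simp
    rw [pvBody_eq_set _ _ (by simp), List.mapIdx_append_one]
    have h1 : (l.mapIdx pvFix ++ [x]).getD l.length ' ' = x := by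
      rw [List.getD_append_right _ _ _ _ (by omega)]; simp [hm]
    have h2 : ∀ v, (l.mapIdx pvFix ++ [x]).set l.length v = l.mapIdx pvFix ++ [v] := by
      intro v; rw [List.set_append_right _ _ (by omega)]; simp [hm]
    rw [h1, h2]

theorem pvMapIdx_suffix (rest : List Char) (k : Nat) (hk : 6 ≤ k) :
    List.mapIdx (fun i c => pvFix (i + k) c) rest = rest.map pvTransSuffix := by
  induction rest generalizing k with
  | nil => rfl
  | cons a rest ih =>
    rw [List.mapIdx_cons, List.map_cons]
    congr 1
    · unfold pvFix
      rw [if_neg (by omega), if_neg (by omega)]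
    · simp only [Nat.add_assoc]
      exact ih (1 + k) (by omega)

theorem pvMapIdx_eq_slices (l : List Char) :
    l.mapIdx pvFix = (l.take 2).map pvTransPrefix ++ ((l.drop 2).take 4).map pvTransMiddle
      ++ (l.drop 6).map pvTransSuffix := by
  rcases l with _|⟨a,_|⟨b,_|⟨c,_|⟨d,_|⟨e,_|⟨f,rest⟩⟩⟩⟩⟩⟩ <;>
    simp [List.mapIdx_cons, pvFix]
  rw [show (fun i => pvFix (i + 1 + 1 + 1 + 1 + 1 + 1)) = (fun i (c : Char) => pvFix (i + 6) c) from
    by funext i; congr 1]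
  exact pvMapIdx_suffix rest 6 le_rfl

-- single-character str.replace is a character map
theorem pvReplaceGo_single (a b : Char) (fuel : Nat) (l acc : List Char) (h : l.length ≤ fuel) :
    PySem.Chars.replace.go [a] [b] fuel l acc
      = acc.reverse ++ l.map (fun c => if c = a then b else c) := by
  induction fuel generalizing l acc with
  | zero =>
    cases l with
    | nil => simp [PySem.Chars.replace.go]
    | cons c t => simp at h
  | succ k ih =>
    cases l with
    | nil => simp [PySem.Chars.replace.go]
    | cons c t =>
      simp only [List.length_cons] at h
      by_cases hc : c = a
      · have hp : List.isPrefixOf [a] (c :: t) = true := by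
          simp [List.isPrefixOf, hc]
        rw [PySem.Chars.replace.go, if_pos hp]
        rw [ih _ _ (by simpa using Nat.le_of_succ_le_succ h)]
        simp [hc]
      · have hp : List.isPrefixOf [a] (c :: t) = false := by
          simp [List.isPrefixOf]; exact fun h' => (hc h'.symm).elim
        rw [PySem.Chars.replace.go, if_neg (by simp [hp])]
        rw [ih _ _ (Nat.le_of_succ_le_succ h)]
        simp [hc]

theorem pvReplace_single (a b : Char) (l : List Char) :
    PySem.Chars.replace l [a] [b] = l.map (fun c => if c = a then b else c) := by
  rw [PySem.Chars.replace, if_neg (by simp)]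
  simpa using pvReplaceGo_single a b l.length l [] le_rfl

-- ===== VERDICT (by name: the statement is the Claim_ definition above) =====
set_option maxHeartbeats 2000000 in
theorem correct_with_context_spec : Claim_equal_correct_with_context := by
  intro text _
  unfold Spec_correct_with_context correct_with_context correct_with_context_alt
  by_cases h : text = "" ∨ PySem.Str.len text < 6
  · rw [if_pos h, if_pos h]
  · rw [if_neg h, if_neg h]
    show String.ofList ((List.range text.toList.length).foldl pvBody text.toList) = _
    rw [pvFoldl_eq_mapIdx, pvMapIdx_eq_slices]
    simp only [pvRules, List.foldl_cons, List.foldl_nil, List.nil_append]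
    have h02 : PySem.List.slice text.toList (some 0) (some 2) = text.toList.take 2 := by
      simp [pysem]
    have h26 : PySem.List.slice text.toList (some 2) (some 6) = (text.toList.drop 2).take 4 := by
      simp [pysem]
    have h6 : PySem.List.slice text.toList (some 6) none = text.toList.drop 6 := by
      simp [pysem]
    rw [h02, h26, h6]
    simp only [pvReplace_single, List.map_map]
    have hp : ((fun c => if c = '8' then 'B' else c) ∘ (fun c => if c = '5' then 'S' else c) ∘
        (fun c => if c = '1' then 'I' else c) ∘ fun c => if c = '0' then 'O' else c) = pvTransPrefix := by
      funext c
      simp only [Function.comp_apply, pvTransPrefix]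
      split_ifs <;> first | rfl | simp_all
    have hm : ((fun c => if c = 'G' then '6' else c) ∘ (fun c => if c = 'Z' then '2' else c) ∘
        (fun c => if c = 'B' then '8' else c) ∘ (fun c => if c = 'S' then '5' else c) ∘
        (fun c => if c = 'L' then '1' else c) ∘ (fun c => if c = 'I' then '1' else c) ∘
        fun c => if c = 'O' then '0' else c) = pvTransMiddle := by
      funext c
      simp only [Function.comp_apply, pvTransMiddle]
      split_ifs <;> first | rfl | simp_all
    have hs : ((fun c => if c = '5' then 'S' else c) ∘ (fun c => if c = '1' then 'I' else c) ∘
        fun c => if c = '0' then 'O' else c) = pvTransSuffix := by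
      funext c
      simp only [Function.comp_apply, pvTransSuffix]
      split_ifs <;> first | rfl | simp_all
    rw [hp, hm, hs]
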